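-- pv_equiv track=rewrite | github.com/TusharDarsena/alumni_management_02 | handle_alumni_data_extraction/alumni_ai_processor.py | _infer_skills_basic
-- ===== SOURCE A (Python) =====
-- from typing import Dict, Any, Optional, List
--
-- def _infer_skills_basic(experience: List[Dict], projects: List[Dict]) -> Optional[Dict]:
--     """Basic skill inference (fallback)"""
--     technical = set()
--     tools = set()
--
--     # From experience titles (70% weight - prioritize)
--     for exp in experience:
--         title = (exp.get('title') or '').lower()
--
--         if 'analyst' in title or 'business' in title:
--             technical.update(['Data Analytics', 'Business Analysis'])
--             tools.update(['SQL', 'Excel'])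
--         if 'engineer' in title or 'developer' in title:
--             technical.update(['Software Development', 'Programming'])
--             tools.update(['Git'])
--         if 'data scientist' in title or 'ml' in title or 'ai' in title:
--             technical.update(['Machine Learning', 'Data Science', 'Python'])
--             tools.update(['TensorFlow', 'scikit-learn'])
--
--     # From projects (30% weight - secondary)
--     for proj in projects[:3]:  # Limit to 3 projects
--         desc = (proj.get('description') or '').lower()
--         title = (proj.get('title') or '').lower()
--         combined = desc + ' ' + title
--
--         if 'deep learning' in combined or 'neural network' in combined:
--             technical.add('Deep Learning')
--         if 'iot' in combined:
--             technical.add('IoT')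
--         if 'arduino' in combined:
--             tools.add('Arduino')
--         if 'python' in combined:
--             technical.add('Python')
--
--     if not technical and not tools:
--         return None
--
--     return {
--         "technical": sorted(list(technical)),
--         "tools": sorted(list(tools))
--     }
-- ===== SOURCE B (Python) =====
-- from typing import Dict, Any, Optional, List
--
-- def _infer_skills_basic(experience: List[Dict], projects: List[Dict]) -> Optional[Dict]:
--     """Basic skill inference (fallback) -- candidate-filter formulation: compute one
--     boolean per keyword group over the whole input, then keep each candidate skill
--     (listed in sorted order) whose flag is set; no sets and no sorting needed."""
--     titles = [(e.get('title') or '').lower() for e in experience]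
--     combos = [((p.get('description') or '').lower() + ' ' + (p.get('title') or '').lower())
--               for p in projects[:3]]
--
--     def hit(texts, *kws):
--         return any(k in t for t in texts for k in kws)
--
--     analyst = hit(titles, 'analyst', 'business')
--     engineer = hit(titles, 'engineer', 'developer')
--     mlrole = hit(titles, 'data scientist', 'ml', 'ai')
--     deep = hit(combos, 'deep learning', 'neural network')
--     iot = hit(combos, 'iot')
--     arduino = hit(combos, 'arduino')
--     python = hit(combos, 'python')
--
--     technical = [s for s, f in [
--         ('Business Analysis', analyst),
--         ('Data Analytics', analyst),
--         ('Data Science', mlrole),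
--         ('Deep Learning', deep),
--         ('IoT', iot),
--         ('Machine Learning', mlrole),
--         ('Programming', engineer),
--         ('Python', mlrole or python),
--         ('Software Development', engineer),
--     ] if f]
--     tools = [s for s, f in [
--         ('Arduino', arduino),
--         ('Excel', analyst),
--         ('Git', engineer),
--         ('SQL', analyst),
--         ('TensorFlow', mlrole),
--         ('scikit-learn', mlrole),
--     ] if f]
--
--     if not technical and not tools:
--         return None
--     return {"technical": technical, "tools": tools}
-- ===== Notes on version B (the rewrite author's own statement) =====
-- stated objective: alternative
-- what changed: Instead of A's per-entry accumulation into two sets followed by sorting, B precomputes one boolean flag per keyword group over all titles/project texts and then filters a fixed candidate list already written in sorted order, so no sets and no sort are used.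
import Mathlib
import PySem

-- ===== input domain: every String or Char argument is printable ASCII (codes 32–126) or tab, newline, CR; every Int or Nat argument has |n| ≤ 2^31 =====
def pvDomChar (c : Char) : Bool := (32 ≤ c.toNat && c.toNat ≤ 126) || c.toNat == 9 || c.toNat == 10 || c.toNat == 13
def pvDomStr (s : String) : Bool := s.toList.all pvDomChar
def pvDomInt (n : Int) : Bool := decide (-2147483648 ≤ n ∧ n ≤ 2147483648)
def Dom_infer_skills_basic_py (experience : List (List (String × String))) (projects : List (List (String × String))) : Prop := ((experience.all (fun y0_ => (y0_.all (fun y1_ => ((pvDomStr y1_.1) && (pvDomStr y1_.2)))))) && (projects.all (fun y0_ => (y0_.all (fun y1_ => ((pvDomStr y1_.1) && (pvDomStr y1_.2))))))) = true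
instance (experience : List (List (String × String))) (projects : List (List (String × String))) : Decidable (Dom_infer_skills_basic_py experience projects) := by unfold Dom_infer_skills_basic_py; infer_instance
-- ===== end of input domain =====

-- B drops A's per-entry set accumulation + final sort: it precomputes one boolean per
-- keyword group over the whole input and filters a fixed candidate list already written
-- in sorted order (alternative decomposition, same cost).

-- ===== PORT A =====
-- one experience entry of A's first loop: the three hardcoded if-blocks, in order
def pvStepExpA (st : PySem.Set String × PySem.Set String) (exp : List (String × String)) :
    PySem.Set String × PySem.Set String :=
  let title := PySem.Str.lower (PySem.Dict.getD (PySem.Dict.mk exp) "title" "")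
  let st :=
    if PySem.Str.isIn "analyst" title || PySem.Str.isIn "business" title then
      (PySem.Set.update st.1 ["Data Analytics", "Business Analysis"],
       PySem.Set.update st.2 ["SQL", "Excel"])
    else st
  let st :=
    if PySem.Str.isIn "engineer" title || PySem.Str.isIn "developer" title then
      (PySem.Set.update st.1 ["Software Development", "Programming"],
       PySem.Set.update st.2 ["Git"])
    else st
  if PySem.Str.isIn "data scientist" title || PySem.Str.isIn "ml" title ||
      PySem.Str.isIn "ai" title then
    (PySem.Set.update st.1 ["Machine Learning", "Data Science", "Python"],
     PySem.Set.update st.2 ["TensorFlow", "scikit-learn"])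
  else st

-- one project entry of A's second loop: the four hardcoded if-blocks, in order
def pvStepProjA (st : PySem.Set String × PySem.Set String) (proj : List (String × String)) :
    PySem.Set String × PySem.Set String :=
  let desc := PySem.Str.lower (PySem.Dict.getD (PySem.Dict.mk proj) "description" "")
  let title := PySem.Str.lower (PySem.Dict.getD (PySem.Dict.mk proj) "title" "")
  let combined := desc ++ " " ++ title
  let st :=
    if PySem.Str.isIn "deep learning" combined || PySem.Str.isIn "neural network" combined then
      (PySem.Set.add st.1 "Deep Learning", st.2)
    else st
  let st := if PySem.Str.isIn "iot" combined then (PySem.Set.add st.1 "IoT", st.2) else st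
  let st := if PySem.Str.isIn "arduino" combined then (st.1, PySem.Set.add st.2 "Arduino") else st
  if PySem.Str.isIn "python" combined then (PySem.Set.add st.1 "Python", st.2) else st

def infer_skills_basic_py (experience : List (List (String × String))) (projects : List (List (String × String))) : Option (List (String × List String)) :=
  let st := experience.foldl pvStepExpA (PySem.Set.empty, PySem.Set.empty)
  let st := (PySem.List.slice projects none (some 3)).foldl pvStepProjA st
  if st.1.isEmpty && st.2.isEmpty then none
  else some [("technical", PySem.List.sorted st.1 (fun x => x) false),
             ("tools", PySem.List.sorted st.2 (fun x => x) false)]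

-- ===== PORT B =====
-- any(k in t for t in texts for k in kws)
def pvHit (texts : List String) (kws : List String) : Bool :=
  texts.any (fun t => kws.any (fun k => PySem.Str.isIn k t))

def infer_skills_basic_py_alt (experience : List (List (String × String))) (projects : List (List (String × String))) : Option (List (String × List String)) :=
  let titles := experience.map
    (fun e => PySem.Str.lower (PySem.Dict.getD (PySem.Dict.mk e) "title" ""))
  let combos := (PySem.List.slice projects none (some 3)).map
    (fun p => PySem.Str.lower (PySem.Dict.getD (PySem.Dict.mk p) "description" "") ++ " " ++
              PySem.Str.lower (PySem.Dict.getD (PySem.Dict.mk p) "title" ""))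
  let analyst := pvHit titles ["analyst", "business"]
  let engineer := pvHit titles ["engineer", "developer"]
  let mlrole := pvHit titles ["data scientist", "ml", "ai"]
  let deep := pvHit combos ["deep learning", "neural network"]
  let iot := pvHit combos ["iot"]
  let arduino := pvHit combos ["arduino"]
  let python := pvHit combos ["python"]
  let technical := (([("Business Analysis", analyst), ("Data Analytics", analyst),
      ("Data Science", mlrole), ("Deep Learning", deep), ("IoT", iot),
      ("Machine Learning", mlrole), ("Programming", engineer),
      ("Python", mlrole || python), ("Software Development", engineer)] :
      List (String × Bool)).filter (fun sf => sf.2)).map (fun sf => sf.1)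
  let tools := (([("Arduino", arduino), ("Excel", analyst), ("Git", engineer),
      ("SQL", analyst), ("TensorFlow", mlrole), ("scikit-learn", mlrole)] :
      List (String × Bool)).filter (fun sf => sf.2)).map (fun sf => sf.1)
  if technical.isEmpty && tools.isEmpty then none
  else some [("technical", technical), ("tools", tools)]

-- ===== PRECONDITION & SPEC =====
def Spec_infer_skills_basic_py (experience : List (List (String × String))) (projects : List (List (String × String))) (out : Option (List (String × List String))) : Prop := out = infer_skills_basic_py_alt experience projects
instance (experience : List (List (String × String))) (projects : List (List (String × String))) (out : Option (List (String × List String))) : Decidable (Spec_infer_skills_basic_py experience projects out) := by unfold Spec_infer_skills_basic_py; infer_instance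

-- ===== CLAIM (what is proved, stated in full; the proofs are below) =====
def Claim_equal_infer_skills_basic_py : Prop := ∀ (experience : List (List (String × String))) (projects : List (List (String × String))), Dom_infer_skills_basic_py experience projects → Spec_infer_skills_basic_py experience projects (infer_skills_basic_py experience projects)

-- ===== LEMMAS AND PROOFS =====

def pvTitle (e : List (String × String)) : String :=
  PySem.Str.lower (PySem.Dict.getD (PySem.Dict.mk e) "title" "")

def pvCombined (p : List (String × String)) : String :=
  PySem.Str.lower (PySem.Dict.getD (PySem.Dict.mk p) "description" "") ++ " " ++
  PySem.Str.lower (PySem.Dict.getD (PySem.Dict.mk p) "title" "")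

def pvCondA (t : String) : Bool := PySem.Str.isIn "analyst" t || PySem.Str.isIn "business" t
def pvCondE (t : String) : Bool := PySem.Str.isIn "engineer" t || PySem.Str.isIn "developer" t
def pvCondM (t : String) : Bool :=
  PySem.Str.isIn "data scientist" t || PySem.Str.isIn "ml" t || PySem.Str.isIn "ai" t
def pvCondDL (c : String) : Bool :=
  PySem.Str.isIn "deep learning" c || PySem.Str.isIn "neural network" c

-- membership through one experience step
theorem pv_mem_stepExp (st : PySem.Set String × PySem.Set String)
    (e : List (String × String)) (x : String) :
    (x ∈ (pvStepExpA st e).1 ↔ x ∈ st.1 ∨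
      (pvCondA (pvTitle e) = true ∧ (x = "Data Analytics" ∨ x = "Business Analysis")) ∨
      (pvCondE (pvTitle e) = true ∧ (x = "Software Development" ∨ x = "Programming")) ∨
      (pvCondM (pvTitle e) = true ∧ (x = "Machine Learning" ∨ x = "Data Science" ∨ x = "Python"))) ∧
    (x ∈ (pvStepExpA st e).2 ↔ x ∈ st.2 ∨
      (pvCondA (pvTitle e) = true ∧ (x = "SQL" ∨ x = "Excel")) ∨
      (pvCondE (pvTitle e) = true ∧ x = "Git") ∨
      (pvCondM (pvTitle e) = true ∧ (x = "TensorFlow" ∨ x = "scikit-learn"))) := by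
  simp only [pvStepExpA, pvCondA, pvCondE, pvCondM, pvTitle]
  generalize PySem.Str.lower (PySem.Dict.getD (PySem.Dict.mk e) "title" "") = t
  rcases ha : (PySem.Str.isIn "analyst" t || PySem.Str.isIn "business" t) with _ | _ <;>
  rcases he : (PySem.Str.isIn "engineer" t || PySem.Str.isIn "developer" t) with _ | _ <;>
  rcases hm : (PySem.Str.isIn "data scientist" t || PySem.Str.isIn "ml" t || PySem.Str.isIn "ai" t) with _ | _ <;>
    simp only [if_true, if_false, Bool.true_eq_false, Bool.false_eq_true,
      PySem.Set.mem_update, List.mem_cons, List.mem_singleton, List.not_mem_nil, or_false,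
      false_and, true_and, false_or, or_assoc] <;>
    constructor <;> tauto

-- membership through one project step
theorem pv_mem_stepProj (st : PySem.Set String × PySem.Set String)
    (p : List (String × String)) (x : String) :
    (x ∈ (pvStepProjA st p).1 ↔ x ∈ st.1 ∨
      (pvCondDL (pvCombined p) = true ∧ x = "Deep Learning") ∨
      (PySem.Str.isIn "iot" (pvCombined p) = true ∧ x = "IoT") ∨
      (PySem.Str.isIn "python" (pvCombined p) = true ∧ x = "Python")) ∧
    (x ∈ (pvStepProjA st p).2 ↔ x ∈ st.2 ∨
      (PySem.Str.isIn "arduino" (pvCombined p) = true ∧ x = "Arduino")) := by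
  simp only [pvStepProjA, pvCondDL, pvCombined]
  generalize PySem.Str.lower (PySem.Dict.getD (PySem.Dict.mk p) "description" "") ++ " " ++
    PySem.Str.lower (PySem.Dict.getD (PySem.Dict.mk p) "title" "") = c
  rcases hd : (PySem.Str.isIn "deep learning" c || PySem.Str.isIn "neural network" c) with _ | _ <;>
  rcases hi : PySem.Str.isIn "iot" c with _ | _ <;>
  rcases hr : PySem.Str.isIn "arduino" c with _ | _ <;>
  rcases hp : PySem.Str.isIn "python" c with _ | _ <;>
    simp only [if_true, if_false, Bool.true_eq_false, Bool.false_eq_true,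
      PySem.Set.mem_add, List.not_mem_nil, or_false,
      false_and, true_and, false_or, or_assoc] <;>
    constructor <;> tauto

-- merging one entry's contribution into the rest of the loop (pure logic)
theorem pv_merge3 (s X1 X2 X3 a1 a2 a3 b1 b2 b3 : Prop) :
    ((s ∨ (a1 ∧ X1) ∨ (a2 ∧ X2) ∨ (a3 ∧ X3)) ∨ (b1 ∧ X1) ∨ (b2 ∧ X2) ∨ (b3 ∧ X3)) ↔
      (s ∨ ((a1 ∨ b1) ∧ X1) ∨ ((a2 ∨ b2) ∧ X2) ∨ ((a3 ∨ b3) ∧ X3)) := by tauto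

theorem pv_merge1 (s X a b : Prop) :
    ((s ∨ (a ∧ X)) ∨ (b ∧ X)) ↔ (s ∨ ((a ∨ b) ∧ X)) := by tauto

-- membership in the whole experience fold
theorem pv_mem_foldExp (l : List (List (String × String)))
    (st : PySem.Set String × PySem.Set String) (x : String) :
    (x ∈ (l.foldl pvStepExpA st).1 ↔ x ∈ st.1 ∨
      (l.any (fun e => pvCondA (pvTitle e)) = true ∧ (x = "Data Analytics" ∨ x = "Business Analysis")) ∨
      (l.any (fun e => pvCondE (pvTitle e)) = true ∧ (x = "Software Development" ∨ x = "Programming")) ∨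
      (l.any (fun e => pvCondM (pvTitle e)) = true ∧ (x = "Machine Learning" ∨ x = "Data Science" ∨ x = "Python"))) ∧
    (x ∈ (l.foldl pvStepExpA st).2 ↔ x ∈ st.2 ∨
      (l.any (fun e => pvCondA (pvTitle e)) = true ∧ (x = "SQL" ∨ x = "Excel")) ∨
      (l.any (fun e => pvCondE (pvTitle e)) = true ∧ x = "Git") ∨
      (l.any (fun e => pvCondM (pvTitle e)) = true ∧ (x = "TensorFlow" ∨ x = "scikit-learn"))) := by
  induction l generalizing st with
  | nil => simp
  | cons e tl ih =>
    simp only [List.foldl_cons, List.any_cons, Bool.or_eq_true]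
    have h := pv_mem_stepExp st e x
    have h' := ih (pvStepExpA st e)
    refine ⟨?_, ?_⟩
    · rw [h'.1, h.1]; exact pv_merge3 _ _ _ _ _ _ _ _ _ _
    · rw [h'.2, h.2]; exact pv_merge3 _ _ _ _ _ _ _ _ _ _

-- membership in the whole project fold
theorem pv_mem_foldProj (l : List (List (String × String)))
    (st : PySem.Set String × PySem.Set String) (x : String) :
    (x ∈ (l.foldl pvStepProjA st).1 ↔ x ∈ st.1 ∨
      (l.any (fun p => pvCondDL (pvCombined p)) = true ∧ x = "Deep Learning") ∨
      (l.any (fun p => PySem.Str.isIn "iot" (pvCombined p)) = true ∧ x = "IoT") ∨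
      (l.any (fun p => PySem.Str.isIn "python" (pvCombined p)) = true ∧ x = "Python")) ∧
    (x ∈ (l.foldl pvStepProjA st).2 ↔ x ∈ st.2 ∨
      (l.any (fun p => PySem.Str.isIn "arduino" (pvCombined p)) = true ∧ x = "Arduino")) := by
  induction l generalizing st with
  | nil => simp
  | cons p tl ih =>
    simp only [List.foldl_cons, List.any_cons, Bool.or_eq_true]
    have h := pv_mem_stepProj st p x
    have h' := ih (pvStepProjA st p)
    refine ⟨?_, ?_⟩
    · rw [h'.1, h.1]; exact pv_merge3 _ _ _ _ _ _ _ _ _ _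
    · rw [h'.2, h.2]; exact pv_merge1 _ _ _ _

-- one experience / project step keeps both components duplicate-free
theorem pv_nodup_stepExp (st : PySem.Set String × PySem.Set String)
    (e : List (String × String)) (h1 : st.1.Nodup) (h2 : st.2.Nodup) :
    (pvStepExpA st e).1.Nodup ∧ (pvStepExpA st e).2.Nodup := by
  simp only [pvStepExpA]
  generalize PySem.Str.lower (PySem.Dict.getD (PySem.Dict.mk e) "title" "") = t
  split_ifs <;>
    exact ⟨by (repeat apply PySem.Set.nodup_update); first | exact h1 | exact h2,
           by (repeat apply PySem.Set.nodup_update); first | exact h1 | exact h2⟩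

theorem pv_nodup_stepProj (st : PySem.Set String × PySem.Set String)
    (p : List (String × String)) (h1 : st.1.Nodup) (h2 : st.2.Nodup) :
    (pvStepProjA st p).1.Nodup ∧ (pvStepProjA st p).2.Nodup := by
  simp only [pvStepProjA]
  generalize PySem.Str.lower (PySem.Dict.getD (PySem.Dict.mk p) "description" "") ++ " " ++
    PySem.Str.lower (PySem.Dict.getD (PySem.Dict.mk p) "title" "") = c
  split_ifs <;>
    exact ⟨by (repeat apply PySem.Set.nodup_add); first | exact h1 | exact h2,
           by (repeat apply PySem.Set.nodup_add); first | exact h1 | exact h2⟩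

-- both folds preserve Nodup of both components
theorem pv_nodup_foldExp (l : List (List (String × String)))
    (st : PySem.Set String × PySem.Set String) (h1 : st.1.Nodup) (h2 : st.2.Nodup) :
    (l.foldl pvStepExpA st).1.Nodup ∧ (l.foldl pvStepExpA st).2.Nodup := by
  induction l generalizing st with
  | nil => exact ⟨h1, h2⟩
  | cons e tl ih =>
    rw [List.foldl_cons]
    exact ih _ (pv_nodup_stepExp st e h1 h2).1 (pv_nodup_stepExp st e h1 h2).2

theorem pv_nodup_foldProj (l : List (List (String × String)))
    (st : PySem.Set String × PySem.Set String) (h1 : st.1.Nodup) (h2 : st.2.Nodup) :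
    (l.foldl pvStepProjA st).1.Nodup ∧ (l.foldl pvStepProjA st).2.Nodup := by
  induction l generalizing st with
  | nil => exact ⟨h1, h2⟩
  | cons p tl ih =>
    rw [List.foldl_cons]
    exact ih _ (pv_nodup_stepProj st p h1 h2).1 (pv_nodup_stepProj st p h1 h2).2

-- the candidate names, in Python's sorted order, and the flagged pairs
def pvTechNames : List String :=
  ["Business Analysis", "Data Analytics", "Data Science", "Deep Learning", "IoT",
   "Machine Learning", "Programming", "Python", "Software Development"]

def pvTechPairs (fa fe fm fdl fio fpy : Bool) : List (String × Bool) :=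
  [("Business Analysis", fa), ("Data Analytics", fa), ("Data Science", fm),
   ("Deep Learning", fdl), ("IoT", fio), ("Machine Learning", fm),
   ("Programming", fe), ("Python", fm || fpy), ("Software Development", fe)]

def pvToolNames : List String :=
  ["Arduino", "Excel", "Git", "SQL", "TensorFlow", "scikit-learn"]

def pvToolPairs (fa fe fm far : Bool) : List (String × Bool) :=
  [("Arduino", far), ("Excel", fa), ("Git", fe), ("SQL", fa),
   ("TensorFlow", fm), ("scikit-learn", fm)]

-- filtered candidate names are a sublist of the full name list
theorem pv_filter_sublist_tech (fa fe fm fdl fio fpy : Bool) :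
    (((pvTechPairs fa fe fm fdl fio fpy).filter (fun sf => sf.2)).map (fun sf => sf.1)).Sublist
      pvTechNames :=
  List.filter_sublist.map _

theorem pv_filter_sublist_tools (fa fe fm far : Bool) :
    (((pvToolPairs fa fe fm far).filter (fun sf => sf.2)).map (fun sf => sf.1)).Sublist
      pvToolNames :=
  List.filter_sublist.map _

theorem pv_tech_names_sorted : pvTechNames.Pairwise (· < ·) := by
  have h : pvTechNames.Pairwise (fun a b => a.toList < b.toList) := by decide
  exact h.imp (fun hab => String.lt_iff_toList_lt.mpr hab)

theorem pv_tool_names_sorted : pvToolNames.Pairwise (· < ·) := by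
  have h : pvToolNames.Pairwise (fun a b => a.toList < b.toList) := by decide
  exact h.imp (fun hab => String.lt_iff_toList_lt.mpr hab)

-- sorted of a Nodup list with the technical-membership characterization IS B's filtered candidate list
theorem pv_sorted_tech (fa fe fm fdl fio fpy : Bool) (s : List String) (hnd : s.Nodup)
    (hmem : ∀ x, x ∈ s ↔
      (fa = true ∧ (x = "Data Analytics" ∨ x = "Business Analysis")) ∨
      (fe = true ∧ (x = "Software Development" ∨ x = "Programming")) ∨
      (fm = true ∧ (x = "Machine Learning" ∨ x = "Data Science" ∨ x = "Python")) ∨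
      (fdl = true ∧ x = "Deep Learning") ∨
      (fio = true ∧ x = "IoT") ∨
      (fpy = true ∧ x = "Python")) :
    PySem.List.sorted s (fun x => x) false =
      ((pvTechPairs fa fe fm fdl fio fpy).filter (fun sf => sf.2)).map (fun sf => sf.1) := by
  apply PySem.List.sorted_eq_of_perm_of_pairwise_lt
  · refine (List.perm_ext_iff_of_nodup
      ((List.Sublist.nodup (pv_filter_sublist_tech fa fe fm fdl fio fpy))
        (by decide : pvTechNames.Nodup)) hnd).mpr ?_
    intro x
    rw [hmem x]
    simp only [pvTechPairs, List.mem_map, List.mem_filter, List.mem_cons, List.not_mem_nil,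
      or_false]
    constructor
    · rintro ⟨a, ⟨(rfl | rfl | rfl | rfl | rfl | rfl | rfl | rfl | rfl), h2⟩, rfl⟩ <;>
        simp at h2 <;> tauto
    · rintro (⟨h, (rfl | rfl)⟩ | ⟨h, (rfl | rfl)⟩ | ⟨h, (rfl | rfl | rfl)⟩ |
        ⟨h, rfl⟩ | ⟨h, rfl⟩ | ⟨h, rfl⟩)
      · exact ⟨("Data Analytics", fa), ⟨by tauto, h⟩, rfl⟩
      · exact ⟨("Business Analysis", fa), ⟨by tauto, h⟩, rfl⟩
      · exact ⟨("Software Development", fe), ⟨by tauto, h⟩, rfl⟩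
      · exact ⟨("Programming", fe), ⟨by tauto, h⟩, rfl⟩
      · exact ⟨("Machine Learning", fm), ⟨by tauto, h⟩, rfl⟩
      · exact ⟨("Data Science", fm), ⟨by tauto, h⟩, rfl⟩
      · exact ⟨("Python", fm || fpy), ⟨by tauto, by simp [h]⟩, rfl⟩
      · exact ⟨("Deep Learning", fdl), ⟨by tauto, h⟩, rfl⟩
      · exact ⟨("IoT", fio), ⟨by tauto, h⟩, rfl⟩
      · exact ⟨("Python", fm || fpy), ⟨by tauto, by simp [h]⟩, rfl⟩
  · exact pv_tech_names_sorted.sublist (pv_filter_sublist_tech fa fe fm fdl fio fpy)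

-- same for the tools list
theorem pv_sorted_tools (fa fe fm far : Bool) (s : List String) (hnd : s.Nodup)
    (hmem : ∀ x, x ∈ s ↔
      (fa = true ∧ (x = "SQL" ∨ x = "Excel")) ∨
      (fe = true ∧ x = "Git") ∨
      (fm = true ∧ (x = "TensorFlow" ∨ x = "scikit-learn")) ∨
      (far = true ∧ x = "Arduino")) :
    PySem.List.sorted s (fun x => x) false =
      ((pvToolPairs fa fe fm far).filter (fun sf => sf.2)).map (fun sf => sf.1) := by
  apply PySem.List.sorted_eq_of_perm_of_pairwise_lt
  · refine (List.perm_ext_iff_of_nodup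
      ((List.Sublist.nodup (pv_filter_sublist_tools fa fe fm far))
        (by decide : pvToolNames.Nodup)) hnd).mpr ?_
    intro x
    rw [hmem x]
    simp only [pvToolPairs, List.mem_map, List.mem_filter, List.mem_cons, List.not_mem_nil,
      or_false]
    constructor
    · rintro ⟨a, ⟨(rfl | rfl | rfl | rfl | rfl | rfl), h2⟩, rfl⟩ <;> simp at h2 <;> tauto
    · rintro (⟨h, (rfl | rfl)⟩ | ⟨h, rfl⟩ | ⟨h, (rfl | rfl)⟩ | ⟨h, rfl⟩)
      · exact ⟨("SQL", fa), ⟨by tauto, h⟩, rfl⟩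
      · exact ⟨("Excel", fa), ⟨by tauto, h⟩, rfl⟩
      · exact ⟨("Git", fe), ⟨by tauto, h⟩, rfl⟩
      · exact ⟨("TensorFlow", fm), ⟨by tauto, h⟩, rfl⟩
      · exact ⟨("scikit-learn", fm), ⟨by tauto, h⟩, rfl⟩
      · exact ⟨("Arduino", far), ⟨by tauto, h⟩, rfl⟩
  · exact pv_tool_names_sorted.sublist (pv_filter_sublist_tools fa fe fm far)

-- B's keyword-group hits over the mapped texts are the per-entry conditions of A's loops
theorem pv_hitA (l : List (List (String × String))) :
    pvHit (l.map (fun e => PySem.Str.lower (PySem.Dict.getD (PySem.Dict.mk e) "title" "")))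
      ["analyst", "business"] = l.any (fun e => pvCondA (pvTitle e)) := by
  simp only [pvHit, List.any_map, pvCondA, pvTitle, Function.comp_def,
    List.any_cons, List.any_nil, Bool.or_false]

theorem pv_hitE (l : List (List (String × String))) :
    pvHit (l.map (fun e => PySem.Str.lower (PySem.Dict.getD (PySem.Dict.mk e) "title" "")))
      ["engineer", "developer"] = l.any (fun e => pvCondE (pvTitle e)) := by
  simp only [pvHit, List.any_map, pvCondE, pvTitle, Function.comp_def,
    List.any_cons, List.any_nil, Bool.or_false]

theorem pv_hitM (l : List (List (String × String))) :
    pvHit (l.map (fun e => PySem.Str.lower (PySem.Dict.getD (PySem.Dict.mk e) "title" "")))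
      ["data scientist", "ml", "ai"] = l.any (fun e => pvCondM (pvTitle e)) := by
  simp only [pvHit, List.any_map, pvCondM, pvTitle, Function.comp_def,
    List.any_cons, List.any_nil, Bool.or_false, Bool.or_assoc]

theorem pv_hitDL (l : List (List (String × String))) :
    pvHit (l.map (fun p => PySem.Str.lower (PySem.Dict.getD (PySem.Dict.mk p) "description" "") ++ " " ++
        PySem.Str.lower (PySem.Dict.getD (PySem.Dict.mk p) "title" "")))
      ["deep learning", "neural network"] = l.any (fun p => pvCondDL (pvCombined p)) := by
  simp only [pvHit, List.any_map, pvCondDL, pvCombined, Function.comp_def,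
    List.any_cons, List.any_nil, Bool.or_false]

theorem pv_hit1 (l : List (List (String × String))) (kw : String) :
    pvHit (l.map (fun p => PySem.Str.lower (PySem.Dict.getD (PySem.Dict.mk p) "description" "") ++ " " ++
        PySem.Str.lower (PySem.Dict.getD (PySem.Dict.mk p) "title" "")))
      [kw] = l.any (fun p => PySem.Str.isIn kw (pvCombined p)) := by
  simp only [pvHit, List.any_map, pvCombined, Function.comp_def,
    List.any_cons, List.any_nil, Bool.or_false]

-- ===== VERDICT (by name: the statement is the Claim_ definition above) =====
set_option maxHeartbeats 1000000 in
theorem infer_skills_basic_py_spec : Claim_equal_infer_skills_basic_py := by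
  intro experience projects _
  unfold Spec_infer_skills_basic_py infer_skills_basic_py infer_skills_basic_py_alt
  simp only []
  rw [pv_hitA, pv_hitE, pv_hitM, pv_hitDL, pv_hit1, pv_hit1, pv_hit1]
  -- names for the loop state and the flags
  have hndE := pv_nodup_foldExp experience (PySem.Set.empty, PySem.Set.empty)
    List.nodup_nil List.nodup_nil
  have hndF := pv_nodup_foldProj (PySem.List.slice projects none (some 3))
    (experience.foldl pvStepExpA (PySem.Set.empty, PySem.Set.empty)) hndE.1 hndE.2
  have hmem1 : ∀ x, x ∈ ((PySem.List.slice projects none (some 3)).foldl pvStepProjA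
      (experience.foldl pvStepExpA (PySem.Set.empty, PySem.Set.empty))).1 ↔
      (experience.any (fun e => pvCondA (pvTitle e)) = true ∧ (x = "Data Analytics" ∨ x = "Business Analysis")) ∨
      (experience.any (fun e => pvCondE (pvTitle e)) = true ∧ (x = "Software Development" ∨ x = "Programming")) ∨
      (experience.any (fun e => pvCondM (pvTitle e)) = true ∧ (x = "Machine Learning" ∨ x = "Data Science" ∨ x = "Python")) ∨
      ((PySem.List.slice projects none (some 3)).any (fun p => pvCondDL (pvCombined p)) = true ∧ x = "Deep Learning") ∨
      ((PySem.List.slice projects none (some 3)).any (fun p => PySem.Str.isIn "iot" (pvCombined p)) = true ∧ x = "IoT") ∨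
      ((PySem.List.slice projects none (some 3)).any (fun p => PySem.Str.isIn "python" (pvCombined p)) = true ∧ x = "Python") := by
    intro x
    rw [(pv_mem_foldProj _ _ x).1, (pv_mem_foldExp _ _ x).1]
    simp only [PySem.Set.empty, List.not_mem_nil, false_or, or_assoc]
  have hmem2 : ∀ x, x ∈ ((PySem.List.slice projects none (some 3)).foldl pvStepProjA
      (experience.foldl pvStepExpA (PySem.Set.empty, PySem.Set.empty))).2 ↔
      (experience.any (fun e => pvCondA (pvTitle e)) = true ∧ (x = "SQL" ∨ x = "Excel")) ∨
      (experience.any (fun e => pvCondE (pvTitle e)) = true ∧ x = "Git") ∨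
      (experience.any (fun e => pvCondM (pvTitle e)) = true ∧ (x = "TensorFlow" ∨ x = "scikit-learn")) ∨
      ((PySem.List.slice projects none (some 3)).any (fun p => PySem.Str.isIn "arduino" (pvCombined p)) = true ∧ x = "Arduino") := by
    intro x
    rw [(pv_mem_foldProj _ _ x).2, (pv_mem_foldExp _ _ x).2]
    simp only [PySem.Set.empty, List.not_mem_nil, false_or, or_assoc]
  have hT := pv_sorted_tech
    (experience.any (fun e => pvCondA (pvTitle e)))
    (experience.any (fun e => pvCondE (pvTitle e)))
    (experience.any (fun e => pvCondM (pvTitle e)))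
    ((PySem.List.slice projects none (some 3)).any (fun p => pvCondDL (pvCombined p)))
    ((PySem.List.slice projects none (some 3)).any (fun p => PySem.Str.isIn "iot" (pvCombined p)))
    ((PySem.List.slice projects none (some 3)).any (fun p => PySem.Str.isIn "python" (pvCombined p)))
    _ hndF.1 hmem1
  have hL := pv_sorted_tools
    (experience.any (fun e => pvCondA (pvTitle e)))
    (experience.any (fun e => pvCondE (pvTitle e)))
    (experience.any (fun e => pvCondM (pvTitle e)))
    ((PySem.List.slice projects none (some 3)).any (fun p => PySem.Str.isIn "arduino" (pvCombined p)))
    _ hndF.2 hmem2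
  have hE1 : ((PySem.List.slice projects none (some 3)).foldl pvStepProjA
      (experience.foldl pvStepExpA (PySem.Set.empty, PySem.Set.empty))).1.isEmpty =
      (((pvTechPairs (experience.any (fun e => pvCondA (pvTitle e)))
        (experience.any (fun e => pvCondE (pvTitle e)))
        (experience.any (fun e => pvCondM (pvTitle e)))
        ((PySem.List.slice projects none (some 3)).any (fun p => pvCondDL (pvCombined p)))
        ((PySem.List.slice projects none (some 3)).any (fun p => PySem.Str.isIn "iot" (pvCombined p)))
        ((PySem.List.slice projects none (some 3)).any (fun p => PySem.Str.isIn "python" (pvCombined p)))).filter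
          (fun sf => sf.2)).map (fun sf => sf.1)).isEmpty := by
    rw [← hT, Bool.eq_iff_iff]
    simp [List.isEmpty_iff, PySem.List.sorted_eq_nil_iff]
  have hE2 : ((PySem.List.slice projects none (some 3)).foldl pvStepProjA
      (experience.foldl pvStepExpA (PySem.Set.empty, PySem.Set.empty))).2.isEmpty =
      (((pvToolPairs (experience.any (fun e => pvCondA (pvTitle e)))
        (experience.any (fun e => pvCondE (pvTitle e)))
        (experience.any (fun e => pvCondM (pvTitle e)))
        ((PySem.List.slice projects none (some 3)).any (fun p => PySem.Str.isIn "arduino" (pvCombined p)))).filter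
          (fun sf => sf.2)).map (fun sf => sf.1)).isEmpty := by
    rw [← hL, Bool.eq_iff_iff]
    simp [List.isEmpty_iff, PySem.List.sorted_eq_nil_iff]
  rw [hE1, hE2, hT, hL]
  simp only [pvTechPairs, pvToolPairs]
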